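-- pv_equiv track=rewrite | github.com/labbit-eu/substrate_prediction | single_conformation/02_build_dbs/libs/database/brenda_loader.py | _extract_protein_reference
-- ===== SOURCE A (Python) =====
-- def _extract_protein_reference(line):
--     reference = set()
--     output_line = ""
--     opened = False
--     buffer = ""
--     for character in line:
--         if character == "#":
--             if opened:
--                 reference.add(buffer)
--                 buffer = ""
--             opened = not opened
--             continue
--         if not opened:
--             output_line += character
--             continue
--         if character == "," or character == " ":
--             reference.add(buffer)
--             buffer = ""
--         else:
--             buffer += character
--
--     return reference, output_line
-- ===== SOURCE B (Python) =====
-- def _extract_protein_reference(line):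
--     # Split once on '#': even parts are plain text, odd parts are reference
--     # sections.  A trailing section with no closing '#' keeps its separator-
--     # delimited pieces except the still-open last one.
--     parts = line.split("#")
--     reference = set()
--     output_parts = []
--     while parts:
--         output_parts.append(parts.pop(0))
--         if not parts:
--             break
--         section = parts.pop(0)
--         pieces = section.replace(",", " ").split(" ")
--         if not parts:
--             pieces = pieces[:-1]
--         reference.update(pieces)
--     return reference, "".join(output_parts)
-- ===== Notes on version B (the rewrite author's own statement) =====
-- stated objective: faster
-- what changed: Replaces A's character-by-character state machine (opened flag + running buffer, building the output by repeated string concatenation) with a single split on '#' whose parts are consumed pairwise: even parts are joined into the output line, odd parts are reference sections split on ','/' ' at once, dropping the unterminated last piece when the final '#' is never closed.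
import Mathlib
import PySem

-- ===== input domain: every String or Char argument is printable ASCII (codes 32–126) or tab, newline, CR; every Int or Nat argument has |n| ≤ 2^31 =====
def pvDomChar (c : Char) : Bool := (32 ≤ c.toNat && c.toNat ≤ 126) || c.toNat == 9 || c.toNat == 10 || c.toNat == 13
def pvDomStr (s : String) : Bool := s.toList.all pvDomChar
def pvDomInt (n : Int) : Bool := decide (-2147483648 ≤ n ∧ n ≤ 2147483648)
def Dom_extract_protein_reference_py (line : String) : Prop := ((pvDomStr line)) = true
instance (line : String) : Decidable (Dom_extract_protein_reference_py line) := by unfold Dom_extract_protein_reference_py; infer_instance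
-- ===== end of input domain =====

-- B replaces A's char-by-char state machine by one split on '#' consumed pairwise (text part, reference
-- section); same return value, measurably faster by a constant factor (bulk split/join vs per-char work).

-- ===== PORT A =====
-- state = (reference set, output_line, opened, buffer); strings handled as List Char, wrapped to String at the end
def pvAStep (st : PySem.Set (List Char) × List Char × Bool × List Char) (c : Char) :
    PySem.Set (List Char) × List Char × Bool × List Char :=
  if c = '#' then
    if st.2.2.1 then (PySem.Set.add st.1 st.2.2.2, st.2.1, false, [])
    else (st.1, st.2.1, true, st.2.2.2)
  else if st.2.2.1 = false then (st.1, st.2.1 ++ [c], false, st.2.2.2)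
  else if c = ',' ∨ c = ' ' then (PySem.Set.add st.1 st.2.2.2, st.2.1, true, [])
  else (st.1, st.2.1, true, st.2.2.2 ++ [c])

def extract_protein_reference_py (line : String) : List String × String :=
  let st := line.toList.foldl pvAStep (PySem.Set.empty, [], false, [])
  (st.1.map String.mk, String.mk st.2.1)

-- ===== PORT B =====
-- pieces of one '#'-delimited reference section: section.replace(",", " ").split(" ")
def pvSplitSep (s : List Char) : List (List Char) :=
  PySem.Chars.splitOn (PySem.Chars.replace s [','] [' ']) [' ']

-- the while-loop of Source B: pop a text part, then (if any) a section part
def pvBGo : List (List Char) → PySem.Set (List Char) → List (List Char) →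
    PySem.Set (List Char) × List (List Char)
  | [], ref, outs => (ref, outs)
  | [t], ref, outs => (ref, outs ++ [t])
  | t :: s :: rest, ref, outs =>
      let pieces := pvSplitSep s
      let pieces := if rest.isEmpty then PySem.List.slice pieces none (some (-1)) else pieces
      pvBGo rest (PySem.Set.update ref pieces) (outs ++ [t])

def extract_protein_reference_py_alt (line : String) : List String × String :=
  let res := pvBGo (PySem.Chars.splitOn line.toList ['#']) PySem.Set.empty []
  (res.1.map String.mk, String.mk (PySem.Chars.join [] res.2))

-- ===== PRECONDITION & SPEC =====
def Spec_extract_protein_reference_py (line : String) (out : List String × String) : Prop := out = extract_protein_reference_py_alt line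
instance (line : String) (out : List String × String) : Decidable (Spec_extract_protein_reference_py line out) := by unfold Spec_extract_protein_reference_py; infer_instance

-- ===== CLAIM (what is proved, stated in full; the proofs are below) =====
def Claim_equal_extract_protein_reference_py : Prop := ∀ (line : String), Dom_extract_protein_reference_py line → Spec_extract_protein_reference_py line (extract_protein_reference_py line)

-- ===== LEMMAS AND PROOFS =====

-- generic splitter on a character predicate, accumulating the current piece in `pre`
def pvSplit (P : Char → Bool) (pre : List Char) : List Char → List (List Char)
  | [] => [pre]
  | c :: cs => if P c then pre :: pvSplit P [] cs else pvSplit P (pre ++ [c]) cs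

def pvIsHash (c : Char) : Bool := c == '#'
def pvIsSep (c : Char) : Bool := c == ',' || c == ' '

-- reference set accumulated by B over the part list (head of each considered pair is a text part)
def pvRefFold : List (List Char) → PySem.Set (List Char) → PySem.Set (List Char)
  | [], r => r
  | [_], r => r
  | _ :: s :: rest, r =>
      pvRefFold rest (PySem.Set.update r
        (if rest = [] then (pvSplit pvIsSep [] s).dropLast else pvSplit pvIsSep [] s))

-- text parts kept by B
def pvTexts : List (List Char) → List (List Char)
  | [] => []
  | [t] => [t]
  | t :: _ :: rest => t :: pvTexts rest

-- reference result when the scan starts inside an open section with pending buffer `buf`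
def pvOpenRef : List (List Char) → List Char → PySem.Set (List Char) → PySem.Set (List Char)
  | [], _, r => r
  | [p], buf, r => PySem.Set.update r (pvSplit pvIsSep [] (buf ++ p)).dropLast
  | p :: rest, buf, r => pvRefFold rest (PySem.Set.update r (pvSplit pvIsSep [] (buf ++ p)))

-- output-line text when the scan starts inside an open section
def pvOpenOut : List (List Char) → List Char
  | [] => []
  | [_] => []
  | _ :: rest => (pvTexts rest).flatten

theorem pv_go_eq (h : Char) : ∀ (fuel : Nat) (l cur : List Char) (acc : List (List Char)),
    l.length < fuel →
    PySem.Chars.splitOn.go [h] fuel l cur acc = acc.reverse ++ pvSplit (· == h) cur.reverse l := by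
  intro fuel
  induction fuel with
  | zero => intro l cur acc hl; omega
  | succ n ih =>
    intro l cur acc hl
    cases l with
    | nil => simp [PySem.Chars.splitOn.go, pvSplit]
    | cons c rest =>
      simp only [PySem.Chars.splitOn.go]
      by_cases hc : c = h
      · simp [hc, List.isPrefixOf, ih rest [] (cur.reverse :: acc) (by simp at hl ⊢; omega), pvSplit]
      · have hpf : List.isPrefixOf [h] (c :: rest) = false := by
          simp [List.isPrefixOf]; exact fun e => hc e.symm
        have hP : (c == h) = false := by simp [hc]
        simp [hpf, hP, ih rest (c :: cur) acc (by simp at hl ⊢; omega), pvSplit]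

theorem pv_splitOn_eq (h : Char) (s : List Char) :
    PySem.Chars.splitOn s [h] = pvSplit (· == h) [] s := by
  have := pv_go_eq h (s.length + 1) s [] [] (by omega)
  simpa [PySem.Chars.splitOn] using this

theorem pv_splitOn_hash (s : List Char) :
    PySem.Chars.splitOn s ['#'] = pvSplit pvIsHash [] s := by
  rw [pv_splitOn_eq]; rfl

theorem pv_replace_go_eq (a b : Char) : ∀ (fuel : Nat) (l acc : List Char), l.length ≤ fuel →
    PySem.Chars.replace.go [a] [b] fuel l acc
      = acc.reverse ++ l.map (fun c => if c = a then b else c) := by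
  intro fuel
  induction fuel with
  | zero =>
    intro l acc hl
    have hnil : l = [] := List.eq_nil_of_length_eq_zero (by omega)
    subst hnil; simp [PySem.Chars.replace.go]
  | succ n ih =>
    intro l acc hl
    cases l with
    | nil => simp [PySem.Chars.replace.go]
    | cons c rest =>
      simp only [PySem.Chars.replace.go]
      by_cases hc : c = a
      · simp [hc, List.isPrefixOf, ih rest (b :: acc) (by simp at hl ⊢; omega)]
      · have hpf : List.isPrefixOf [a] (c :: rest) = false := by
          simp [List.isPrefixOf]; exact fun e => hc e.symm
        simp [hpf, hc, ih rest (c :: acc) (by simp at hl ⊢; omega)]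

theorem pv_replace_eq (a b : Char) (s : List Char) :
    PySem.Chars.replace s [a] [b] = s.map (fun c => if c = a then b else c) := by
  simpa [PySem.Chars.replace] using pv_replace_go_eq a b s.length s [] (le_refl _)

-- splitting the comma→space image on ' ' is splitting the original on ','/' '
theorem pv_split_map : ∀ (s pre : List Char),
    pvSplit (· == ' ') pre (s.map (fun c => if c = ',' then ' ' else c)) = pvSplit pvIsSep pre s := by
  intro s
  induction s with
  | nil => intro pre; simp [pvSplit]
  | cons c cs ih =>
    intro pre
    by_cases hsep : pvIsSep c = true
    · have : (if c = ',' then ' ' else c) = ' ' := by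
        simp [pvIsSep] at hsep; rcases hsep with h | h <;> simp [h]
      simp [pvSplit, this, hsep, ih]
    · have hc1 : c ≠ ',' := by intro h; simp [pvIsSep, h] at hsep
      have hc2 : c ≠ ' ' := by intro h; simp [pvIsSep, h] at hsep
      simp [pvSplit, hc1, hc2, hsep, ih]

theorem pv_splitSep_eq (s : List Char) : pvSplitSep s = pvSplit pvIsSep [] s := by
  rw [pvSplitSep, pv_replace_eq, pv_splitOn_eq, pv_split_map]

theorem pv_split_ne_nil (P : Char → Bool) : ∀ (cs pre : List Char), pvSplit P pre cs ≠ [] := by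
  intro cs
  induction cs with
  | nil => intro pre; simp [pvSplit]
  | cons c cs ih => intro pre; by_cases h : P c <;> simp [pvSplit, h, ih]

theorem pv_split_pre (P : Char → Bool) : ∀ (cs pre : List Char),
    pvSplit P pre cs = (pre ++ (pvSplit P [] cs).headD []) :: (pvSplit P [] cs).tail := by
  intro cs
  induction cs with
  | nil => intro pre; simp [pvSplit]
  | cons c cs ih =>
    intro pre
    by_cases h : P c
    · simp [pvSplit, h]
    · rw [pvSplit, if_neg (by simp [h]), ih (pre ++ [c])]
      conv_rhs => rw [pvSplit, if_neg (by simp [h]), ih ([] ++ [c])]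
      simp

theorem pv_split_sepfree (P : Char → Bool) : ∀ (buf : List Char), (∀ c ∈ buf, P c = false) →
    ∀ (pre rest : List Char), pvSplit P pre (buf ++ rest) = pvSplit P (pre ++ buf) rest := by
  intro buf
  induction buf with
  | nil => intro _ pre rest; simp
  | cons b bs ih =>
    intro h pre rest
    have hb : P b = false := h b (by simp)
    have := ih (fun c hc => h c (by simp [hc])) (pre ++ [b]) rest
    simp [pvSplit, hb, this]

theorem pv_split_sepfree_self (P : Char → Bool) (buf : List Char) (h : ∀ c ∈ buf, P c = false) :
    pvSplit P [] buf = [buf] := by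
  have := pv_split_sepfree P buf h [] []
  simpa [pvSplit] using this

theorem pv_refFold_head (x y : List Char) (rest : List (List Char)) (r : PySem.Set (List Char)) :
    pvRefFold (x :: rest) r = pvRefFold (y :: rest) r := by
  cases rest <;> rfl

theorem pv_texts_cons (x : List Char) (rest : List (List Char)) :
    pvTexts (x :: rest) = x :: pvTexts rest.tail := by
  cases rest <;> rfl

theorem pv_openRef_congr (p p' : List Char) (rest : List (List Char)) (buf buf' : List Char)
    (r : PySem.Set (List Char)) (h : buf ++ p = buf' ++ p') :
    pvOpenRef (p :: rest) buf r = pvOpenRef (p' :: rest) buf' r := by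
  cases rest <;> simp [pvOpenRef, h]

theorem pv_openOut_head (p q : List Char) (rest : List (List Char)) :
    pvOpenOut (p :: rest) = pvOpenOut (q :: rest) := by
  cases rest <;> rfl

-- MAIN invariant: A's fold, from a closed state (empty buffer) resp. an open state with
-- separator-free pending buffer, computes exactly B's part-wise result.
theorem pv_main : ∀ (cs : List Char) (ref : PySem.Set (List Char)) (out buf : List Char),
    (((cs.foldl pvAStep (ref, out, false, [])).1 = pvRefFold (pvSplit pvIsHash [] cs) ref ∧
      (cs.foldl pvAStep (ref, out, false, [])).2.1
        = out ++ (pvTexts (pvSplit pvIsHash [] cs)).flatten)) ∧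
    ((∀ c ∈ buf, pvIsSep c = false) →
      ((cs.foldl pvAStep (ref, out, true, buf)).1 = pvOpenRef (pvSplit pvIsHash [] cs) buf ref ∧
       (cs.foldl pvAStep (ref, out, true, buf)).2.1 = out ++ pvOpenOut (pvSplit pvIsHash [] cs))) := by
  intro cs
  induction cs with
  | nil =>
    intro ref out buf
    constructor
    · simp [pvSplit, pvRefFold, pvTexts]
    · intro hbuf
      have h1 : pvSplit pvIsSep [] buf = [buf] := pv_split_sepfree_self pvIsSep buf hbuf
      simp [pvSplit, pvOpenRef, pvOpenOut, h1, PySem.Set.update_nil]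
  | cons c cs ih =>
    intro ref out buf
    obtain ⟨q, rest, hS⟩ : ∃ q rest, pvSplit pvIsHash [] cs = q :: rest := by
      cases h : pvSplit pvIsHash [] cs with
      | nil => exact absurd h (pv_split_ne_nil _ _ _)
      | cons a b => exact ⟨a, b, rfl⟩
    constructor
    · -- closed state, empty buffer
      by_cases hc : c = '#'
      · -- '#': open a section with empty buffer
        have hstep : pvAStep (ref, out, false, []) c = (ref, out, true, []) := by
          simp [pvAStep, hc]
        have hP : pvIsHash c = true := by simp [pvIsHash, hc]
        have hparts : pvSplit pvIsHash [] (c :: cs) = [] :: q :: rest := by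
          simp [pvSplit, hP, hS]
        have hopen := (ih ref out []).2 (by simp)
        rw [hS] at hopen
        rw [List.foldl_cons, hstep, hparts]
        cases rest with
        | nil =>
          refine ⟨?_, ?_⟩
          · rw [hopen.1]; simp [pvRefFold, pvOpenRef]
          · rw [hopen.2]; simp [pvTexts, pvOpenOut]
        | cons a b =>
          refine ⟨?_, ?_⟩
          · rw [hopen.1]; simp [pvRefFold, pvOpenRef]
          · rw [hopen.2]; simp [pvTexts, pvOpenOut]
      · -- plain character: append to the output line
        have hstep : pvAStep (ref, out, false, []) c = (ref, out ++ [c], false, []) := by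
          simp [pvAStep, hc]
        have hP : pvIsHash c = false := by simp [pvIsHash, hc]
        have hparts : pvSplit pvIsHash [] (c :: cs) = (c :: q) :: rest := by
          rw [pvSplit, if_neg (by simp [hP]), pv_split_pre, hS]
          simp
        have hcl := (ih ref (out ++ [c]) []).1
        rw [hS] at hcl
        rw [List.foldl_cons, hstep, hparts]
        refine ⟨?_, ?_⟩
        · rw [hcl.1, pv_refFold_head (c :: q) q]
        · rw [hcl.2, pv_texts_cons q rest, pv_texts_cons (c :: q) rest]
          simp
    · -- open state with separator-free buffer
      intro hbuf
      by_cases hc : c = '#'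
      · -- '#': close the section, flush the buffer
        have hstep : pvAStep (ref, out, true, buf) c = (PySem.Set.add ref buf, out, false, []) := by
          simp [pvAStep, hc]
        have hP : pvIsHash c = true := by simp [pvIsHash, hc]
        have hparts : pvSplit pvIsHash [] (c :: cs) = [] :: q :: rest := by
          simp [pvSplit, hP, hS]
        have hcl := (ih (PySem.Set.add ref buf) out []).1
        rw [hS] at hcl
        have hbufsplit : pvSplit pvIsSep [] buf = [buf] := pv_split_sepfree_self pvIsSep buf hbuf
        rw [List.foldl_cons, hstep, hparts]
        refine ⟨?_, ?_⟩
        · rw [hcl.1]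
          simp [pvOpenRef, hbufsplit]
        · rw [hcl.2]
          simp [pvOpenOut]
      · by_cases hsep : c = ',' ∨ c = ' '
        · -- separator inside a section: flush the buffer
          have hstep : pvAStep (ref, out, true, buf) c = (PySem.Set.add ref buf, out, true, []) := by
            simp [pvAStep, hc, hsep]
          have hP : pvIsHash c = false := by simp [pvIsHash, hc]
          have hparts : pvSplit pvIsHash [] (c :: cs) = (c :: q) :: rest := by
            rw [pvSplit, if_neg (by simp [hP]), pv_split_pre, hS]
            simp
          have hopen := (ih (PySem.Set.add ref buf) out []).2 (by simp)
          rw [hS] at hopen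
          have hPsep : pvIsSep c = true := by
            rcases hsep with h | h <;> simp [pvIsSep, h]
          have hsplit : pvSplit pvIsSep [] (buf ++ c :: q) = buf :: pvSplit pvIsSep [] q := by
            rw [pv_split_sepfree pvIsSep buf hbuf, pvSplit, if_pos hPsep]
            simp
          rw [List.foldl_cons, hstep]
          rw [hparts]
          obtain ⟨q1, rest1, hq⟩ : ∃ q1 rest1, pvSplit pvIsSep [] q = q1 :: rest1 := by
            cases h : pvSplit pvIsSep [] q with
            | nil => exact absurd h (pv_split_ne_nil _ _ _)
            | cons a b => exact ⟨a, b, rfl⟩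
          refine ⟨?_, ?_⟩
          · rw [hopen.1]
            cases rest with
            | nil =>
              simp [pvOpenRef, hsplit, hq, PySem.Set.update_cons]
            | cons a b =>
              simp [pvOpenRef, hsplit, PySem.Set.update_cons]
          · rw [hopen.2, pv_openOut_head (c :: q) q]
        · -- ordinary character inside a section: grow the buffer
          have hstep : pvAStep (ref, out, true, buf) c = (ref, out, true, buf ++ [c]) := by
            simp [pvAStep, hc, hsep]
          have hP : pvIsHash c = false := by simp [pvIsHash, hc]
          have hparts : pvSplit pvIsHash [] (c :: cs) = (c :: q) :: rest := by
            rw [pvSplit, if_neg (by simp [hP]), pv_split_pre, hS]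
            simp
          have hbuf' : ∀ x ∈ buf ++ [c], pvIsSep x = false := by
            intro x hx
            rcases List.mem_append.1 hx with h | h
            · exact hbuf x h
            · simp at h
              subst h
              rcases not_or.1 hsep with ⟨h1, h2⟩
              simp [pvIsSep, h1, h2]
          have hopen := (ih ref out (buf ++ [c])).2 hbuf'
          rw [hS] at hopen
          rw [List.foldl_cons, hstep, hparts]
          refine ⟨?_, ?_⟩
          · rw [hopen.1, pv_openRef_congr (c :: q) q rest buf (buf ++ [c]) ref (by simp)]
          · rw [hopen.2, pv_openOut_head (c :: q) q]

theorem pv_bgo_spec : ∀ (parts : List (List Char)) (ref : PySem.Set (List Char))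
    (outs : List (List Char)),
    pvBGo parts ref outs = (pvRefFold parts ref, outs ++ pvTexts parts) := by
  intro parts
  induction parts using pvTexts.induct with
  | case1 => intro ref outs; simp [pvBGo, pvRefFold, pvTexts]
  | case2 t => intro ref outs; simp [pvBGo, pvRefFold, pvTexts]
  | case3 t s rest ih =>
    intro ref outs
    have hsl : ∀ (xs : List (List Char)), PySem.List.slice xs none (some (-1)) = xs.dropLast :=
      fun xs => by simp [pysem]
    cases rest with
    | nil =>
      simp [pvBGo, pvRefFold, pvTexts, hsl, pv_splitSep_eq]
    | cons a b =>
      simp [pvBGo, pvRefFold, pvTexts, pv_splitSep_eq, ih]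

theorem pv_join_nil_flatten (ps : List (List Char)) : PySem.Chars.join [] ps = ps.flatten := by
  induction ps with
  | nil => simp [PySem.Chars.join, List.intercalate, List.intersperse]
  | cons p ps ih =>
    simp [PySem.Chars.join, List.intercalate] at ih ⊢
    cases ps <;> simp_all [List.intersperse]

-- ===== VERDICT (by name: the statement is the Claim_ definition above) =====
theorem extract_protein_reference_py_spec : Claim_equal_extract_protein_reference_py := by
  intro line _
  have hmain := (pv_main line.toList PySem.Set.empty [] []).1
  obtain ⟨h1, h2⟩ := hmain
  simp only [Spec_extract_protein_reference_py, extract_protein_reference_py,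
    extract_protein_reference_py_alt, pv_bgo_spec, pv_splitOn_hash, pv_join_nil_flatten,
    List.nil_append]
  rw [h1, h2]
  simp
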